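-- pv_equiv track=rewrite | github.com/gokul-19/LLM_BBD_DEMO | app.py | split_scenarios
-- ===== SOURCE A (Python) =====
-- def split_scenarios(gherkin_text: str):
--     blocks = []
--     current = []
--     for line in gherkin_text.splitlines():
--         if line.strip().startswith("Scenario:"):
--             if current:
--                 blocks.append("\n".join(current).strip())
--                 current = []
--         current.append(line)
--     if current:
--         blocks.append("\n".join(current).strip())
--     return blocks
-- ===== SOURCE B (Python) =====
-- def split_scenarios(gherkin_text: str):
--     lines = gherkin_text.splitlines()
--     res = []
--     i = 0
--     n = len(lines)
--     while i < n:
--         j = i + 1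
--         while j < n and not lines[j].strip().startswith("Scenario:"):
--             j += 1
--         res.append("\n".join(lines[i:j]).strip())
--         i = j
--     return res
-- ===== Notes on version B (the rewrite author's own statement) =====
-- stated objective: alternative
-- what changed: A folds over all lines with a (blocks, current) accumulator and a final flush; B is a two-pointer scan that, for each block start, advances a second index to the next 'Scenario:' marker and emits the slice directly, with no accumulator state or trailing flush.
import Mathlib
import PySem

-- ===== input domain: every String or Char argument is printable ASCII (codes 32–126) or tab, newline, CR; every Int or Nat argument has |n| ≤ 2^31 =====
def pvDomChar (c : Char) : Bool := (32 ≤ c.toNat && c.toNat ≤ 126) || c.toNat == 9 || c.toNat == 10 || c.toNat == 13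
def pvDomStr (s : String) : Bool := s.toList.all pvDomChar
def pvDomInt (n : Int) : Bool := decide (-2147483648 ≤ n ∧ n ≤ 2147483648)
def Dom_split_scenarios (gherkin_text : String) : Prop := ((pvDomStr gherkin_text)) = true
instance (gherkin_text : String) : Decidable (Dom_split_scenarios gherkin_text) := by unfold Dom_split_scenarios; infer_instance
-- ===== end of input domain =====

-- B replaces A's (blocks, current)-accumulator fold with a two-pointer scan emitting each
-- block slice directly (objective: alternative decomposition, same cost).

-- ===== PORT A =====
-- line.strip().startswith("Scenario:")
def pvPred (line : String) : Bool :=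
  PySem.Str.startswith (PySem.Str.strip line) "Scenario:"

-- "\n".join(current).strip()
def pvFlush (current : List String) : String :=
  PySem.Str.strip (PySem.Str.join "\n" current)

-- one iteration of A's for-loop over (blocks, current)
def pvStep (s : List String × List String) (line : String) : List String × List String :=
  if pvPred line then
    if s.2 = [] then (s.1, s.2 ++ [line])
    else (s.1 ++ [pvFlush s.2], [line])
  else (s.1, s.2 ++ [line])

def split_scenarios (gherkin_text : String) : List String :=
  let st := (PySem.Str.splitlines gherkin_text).foldl pvStep ([], [])
  if st.2 = [] then st.1 else st.1 ++ [pvFlush st.2]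

-- ===== PORT B =====
-- B's outer while loop on the suffix of lines starting at i; the inner while that advances j
-- to the next marker is the takeWhile/dropWhile split of the tail, lines[i:j] the emitted slice.
def pvGo : List String → List String
  | [] => []
  | l :: rest =>
      PySem.Str.strip (PySem.Str.join "\n" (l :: rest.takeWhile (fun x => !pvPred x)))
        :: pvGo (rest.dropWhile (fun x => !pvPred x))
termination_by ls => ls.length
decreasing_by
  have := List.length_dropWhile_le (p := fun x => !pvPred x) (l := rest)
  simp only [List.length_cons]; omega

def split_scenarios_alt (gherkin_text : String) : List String :=
  pvGo (PySem.Str.splitlines gherkin_text)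

-- ===== PRECONDITION & SPEC =====
def Spec_split_scenarios (gherkin_text : String) (out : List String) : Prop := out = split_scenarios_alt gherkin_text
instance (gherkin_text : String) (out : List String) : Decidable (Spec_split_scenarios gherkin_text out) := by unfold Spec_split_scenarios; infer_instance

-- ===== CLAIM (what is proved, stated in full; the proofs are below) =====
def Claim_equal_split_scenarios : Prop := ∀ (gherkin_text : String), Dom_split_scenarios gherkin_text → Spec_split_scenarios gherkin_text (split_scenarios gherkin_text)

-- ===== LEMMAS AND PROOFS =====

-- core invariant: A's fold from a nonempty current block equals the block closed at the next
-- marker followed by B's scan of the remaining lines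
lemma pv_fold_flush (ls : List String) : ∀ (blocks current : List String), current ≠ [] →
    (let st := ls.foldl pvStep (blocks, current);
     if st.2 = [] then st.1 else st.1 ++ [pvFlush st.2])
    = blocks ++ pvFlush (current ++ ls.takeWhile (fun x => !pvPred x))
        :: pvGo (ls.dropWhile (fun x => !pvPred x)) := by
  induction ls with
  | nil =>
      intro blocks current h
      simp [pvGo, pvFlush, h]
  | cons l ls ih =>
      intro blocks current h
      by_cases hp : pvPred l = true
      · have hstep : pvStep (blocks, current) l = (blocks ++ [pvFlush current], [l]) := by
          simp [pvStep, hp, h]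
        simp only [List.foldl_cons, hstep]
        rw [ih (blocks ++ [pvFlush current]) [l] (by simp)]
        simp [hp, pvGo, pvFlush]
      · have hp' : pvPred l = false := by simpa using hp
        have hstep : pvStep (blocks, current) l = (blocks, current ++ [l]) := by
          simp [pvStep, hp']
        simp only [List.foldl_cons, hstep]
        rw [ih blocks (current ++ [l]) (by simp)]
        simp [hp']

-- ===== VERDICT (by name: the statement is the Claim_ definition above) =====
theorem split_scenarios_spec : Claim_equal_split_scenarios := by
  intro t _
  show split_scenarios t = split_scenarios_alt t
  unfold split_scenarios split_scenarios_alt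
  cases hls : PySem.Str.splitlines t with
  | nil => simp [pvGo]
  | cons l ls =>
      have hfirst : pvStep ([], []) l = ([], [l]) := by
        by_cases hp : pvPred l = true <;> simp [pvStep, hp]
      simp only [List.foldl_cons, hfirst]
      rw [pv_fold_flush ls [] [l] (by simp)]
      simp [pvGo, pvFlush]
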